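-- pv_equiv track=rewrite | github.com/Braulio256/PracticasIA | Practica 2/Algoritmos de ordenamiento externos/004_Polyphase sort.py | distribucion_fibonacci
-- ===== SOURCE A (Python) =====
-- def distribucion_fibonacci(M, num_runs):
--     """Calcula la distribución óptima de runs usando secuencia Fibonacci."""
--     fib = [1, 1]
--     while fib[-1] < num_runs:
--         fib.append(fib[-1] + fib[-2])
--
--     distribucion = []
--     remaining = num_runs
--     for f in reversed(fib[1:]):
--         if f <= remaining:
--             distribucion.append(f)
--             remaining -= f
--     return distribucion
-- ===== SOURCE B (Python) =====
-- def distribucion_fibonacci(M, num_runs):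
--     """Misma distribucion greedy de Fibonacci, sin construir ni invertir lista alguna:
--     dos variables rodantes ascienden y luego descienden por la sucesion."""
--     a, b = 1, 1
--     while b < num_runs:
--         a, b = b, a + b
--     distribucion = []
--     remaining = num_runs
--     while a > 0:
--         if b <= remaining:
--             distribucion.append(b)
--             remaining -= b
--         a, b = b - a, a
--     return distribucion
-- ===== Notes on version B (the rewrite author's own statement) =====
-- stated objective: simpler
-- what changed: B eliminates the fib list entirely: two rolling variables ascend to the top Fibonacci pair, then descend in place (a,b -> b-a,a), emitting the same greedy Zeckendorf digits without building, slicing or reversing any list.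
import Mathlib
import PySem

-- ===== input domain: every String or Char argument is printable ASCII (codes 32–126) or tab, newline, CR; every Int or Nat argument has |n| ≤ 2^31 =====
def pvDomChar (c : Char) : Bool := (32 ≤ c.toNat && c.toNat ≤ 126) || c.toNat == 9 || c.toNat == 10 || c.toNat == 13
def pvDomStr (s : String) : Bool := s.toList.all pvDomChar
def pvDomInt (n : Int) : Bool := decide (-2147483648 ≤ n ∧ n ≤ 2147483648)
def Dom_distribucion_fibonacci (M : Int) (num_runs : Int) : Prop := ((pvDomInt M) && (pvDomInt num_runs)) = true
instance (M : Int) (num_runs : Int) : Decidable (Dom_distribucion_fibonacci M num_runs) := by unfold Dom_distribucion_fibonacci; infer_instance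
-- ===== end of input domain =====

-- B replaces A's explicit fib list (built, sliced and reversed) by two rolling
-- variables that ascend and then descend the Fibonacci sequence in place (simpler).
-- The while-loops are ported as structural recursion on a fuel that provably covers
-- every iteration the Python loop performs (a totality guard only; see the lemmas).

-- ===== PORT A =====
-- A's while-loop growing the fib list; a = fib[-2], b = fib[-1].
-- fuel = (num_runs - 1).toNat ≥ the number of iterations: b starts at 1 and grows
-- by at least 1 per iteration, and the loop runs only while b < num_runs.
def pvFibLoop (num_runs : Int) : Nat → Int → Int → List Int → List Int
  | 0, _, _, fib => fib
  | fuel + 1, a, b, fib =>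
    if b < num_runs then pvFibLoop num_runs fuel b (a + b) (fib ++ [a + b]) else fib

-- A's for-loop over reversed(fib[1:]) with the greedy subtraction.
def pvGreedy (l : List Int) (remaining : Int) (acc : List Int) : List Int :=
  match l with
  | [] => acc
  | f :: rest =>
    if f ≤ remaining then pvGreedy rest (remaining - f) (acc ++ [f])
    else pvGreedy rest remaining acc

def distribucion_fibonacci (M : Int) (num_runs : Int) : List Int :=
  pvGreedy (((pvFibLoop num_runs (num_runs - 1).toNat 1 1 [1, 1]).drop 1).reverse)
    num_runs []

-- ===== PORT B =====
-- B's first while-loop: (a, b) = (b, a+b) until b >= num_runs (same fuel bound as A's).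
def pvAscend (num_runs : Int) : Nat → Int → Int → Int × Int
  | 0, a, b => (a, b)
  | fuel + 1, a, b =>
    if b < num_runs then pvAscend num_runs fuel b (a + b) else (a, b)

-- B's second while-loop: greedy emit while stepping (a, b) := (b - a, a).
-- fuel = (a + b).toNat ≥ the number of iterations: while a > 0 the sum a + b
-- strictly decreases and stays positive for the Fibonacci pairs reached here.
def pvDescend : Nat → Int → Int → Int → List Int → List Int
  | 0, _, _, _, acc => acc
  | fuel + 1, a, b, remaining, acc =>
    if a > 0 then
      if b ≤ remaining then pvDescend fuel (b - a) a (remaining - b) (acc ++ [b])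
      else pvDescend fuel (b - a) a remaining acc
    else acc

def distribucion_fibonacci_alt (M : Int) (num_runs : Int) : List Int :=
  let p := pvAscend num_runs (num_runs - 1).toNat 1 1
  pvDescend (p.1 + p.2).toNat p.1 p.2 num_runs []

-- ===== PRECONDITION & SPEC =====
def Spec_distribucion_fibonacci (M : Int) (num_runs : Int) (out : List Int) : Prop := out = distribucion_fibonacci_alt M num_runs
instance (M : Int) (num_runs : Int) (out : List Int) : Decidable (Spec_distribucion_fibonacci M num_runs out) := by unfold Spec_distribucion_fibonacci; infer_instance

-- ===== CLAIM (what is proved, stated in full; the proofs are below) =====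
def Claim_equal_distribucion_fibonacci : Prop := ∀ (M : Int) (num_runs : Int), Dom_distribucion_fibonacci M num_runs → Spec_distribucion_fibonacci M num_runs (distribucion_fibonacci M num_runs)

-- ===== LEMMAS AND PROOFS =====

-- the descending Fibonacci chain b, a, b-a, … : exactly the values pvDescend visits,
-- and (we prove) exactly A's reversed fib[1:]
def pvChain (a b : Int) : List Int :=
  if h : 0 < a ∧ 0 ≤ b then b :: pvChain (b - a) a else []
termination_by (a + b).toNat
decreasing_by omega

theorem pvAscend_inv (num_runs : Int) (fuel : Nat) (a b : Int)
    (ha : 1 ≤ a) (hab : a ≤ b) :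
    1 ≤ (pvAscend num_runs fuel a b).1 ∧
      (pvAscend num_runs fuel a b).1 ≤ (pvAscend num_runs fuel a b).2 := by
  induction fuel generalizing a b with
  | zero => exact ⟨ha, hab⟩
  | succ fuel ih =>
    rw [pvAscend]
    split
    · exact ih b (a + b) (by omega) (by omega)
    · exact ⟨ha, hab⟩

theorem pvDescend_eq_greedy (fuel : Nat) (a b remaining : Int) (acc : List Int)
    (hb : 0 ≤ b) (hfuel : 0 < a → (a + b).toNat ≤ fuel) :
    pvDescend fuel a b remaining acc = pvGreedy (pvChain a b) remaining acc := by
  induction fuel generalizing a b remaining acc with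
  | zero =>
    have ha : ¬ (0 < a) := by intro h; have := hfuel h; omega
    rw [pvDescend, pvChain, dif_neg (by omega : ¬ (0 < a ∧ 0 ≤ b)), pvGreedy]
  | succ fuel ih =>
    rw [pvDescend]
    by_cases h : a > 0
    · rw [if_pos h]
      have hf := hfuel h
      rw [pvChain, dif_pos (by omega : 0 < a ∧ 0 ≤ b), pvGreedy]
      by_cases hle : b ≤ remaining
      · rw [if_pos hle, if_pos hle]
        exact ih (b - a) a (remaining - b) (acc ++ [b]) (by omega) (by omega)
      · rw [if_neg hle, if_neg hle]
        exact ih (b - a) a remaining acc (by omega) (by omega)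
    · rw [if_neg h, pvChain, dif_neg (by omega : ¬ (0 < a ∧ 0 ≤ b)), pvGreedy]

theorem pvFibLoop_chain (num_runs : Int) (fuel : Nat) (a b : Int) (fib : List Int)
    (ha : 1 ≤ a) (hab : a ≤ b) (hne : fib ≠ [])
    (hinv : (fib.drop 1).reverse = pvChain a b) :
    ((pvFibLoop num_runs fuel a b fib).drop 1).reverse
      = pvChain (pvAscend num_runs fuel a b).1 (pvAscend num_runs fuel a b).2 := by
  induction fuel generalizing a b fib with
  | zero => exact hinv
  | succ fuel ih =>
    rw [pvFibLoop, pvAscend]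
    split
    · refine ih b (a + b) (fib ++ [a + b]) (by omega) (by omega) (by simp) ?_
      rw [List.drop_append_of_le_length (by cases fib <;> simp_all),
        List.reverse_append]
      simp only [List.reverse_cons, List.reverse_nil, List.nil_append,
        List.singleton_append]
      rw [hinv]
      conv_rhs => rw [pvChain]
      rw [dif_pos (by omega : 0 < b ∧ 0 ≤ a + b)]
      congr 2
      omega
    · exact hinv

-- ===== VERDICT (by name: the statement is the Claim_ definition above) =====
theorem distribucion_fibonacci_spec : Claim_equal_distribucion_fibonacci := by
  intro M num_runs _
  show _ = _
  unfold distribucion_fibonacci distribucion_fibonacci_alt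
  have hinv := pvAscend_inv num_runs (num_runs - 1).toNat 1 1 (le_refl 1) (le_refl 1)
  rw [pvDescend_eq_greedy _ _ _ _ _ (by omega) (by omega)]
  congr 1
  exact pvFibLoop_chain num_runs (num_runs - 1).toNat 1 1 [1, 1] (le_refl 1) (le_refl 1)
    (by simp)
    (by rw [pvChain, dif_pos (by norm_num : (0:Int) < 1 ∧ (0:Int) ≤ 1), pvChain,
            dif_neg (by norm_num : ¬ ((0:Int) < 1 - 1 ∧ (0:Int) ≤ 1))]; rfl)
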